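-- pv_equiv track=rewrite | github.com/Piyush-hacker/GFG_Daily_Solution | Difficulty: Medium/Count Indices to Balance Even and Odd Sums/count-indices-to-balance-even-and-odd-sums.py | cntWays
-- ===== SOURCE A (Python) =====
-- def cntWays(arr):
--     n=len(arr)
--     total_even,total_odd=0,0
--     for i in range(n):
--         if i&1:
--             total_odd+=arr[i]
--         else:
--             total_even+=arr[i]
--     ans=0
--     pre_even,pre_odd=0,0
--     for i in range(n):
--         if i&1:
--             total_odd-=arr[i]
--         else:
--             total_even-=arr[i]
--         new_even=pre_even+total_odd
--         new_odd=pre_odd+total_even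
--         if new_even==new_odd:
--             ans+=1
--         if i&1:
--             pre_odd+=arr[i]
--         else:
--             pre_even+=arr[i]
--     return ans
-- ===== SOURCE B (Python) =====
-- def cntWays(arr):
--     # signed prefix sums: d[i] = sum of (+arr[j] if j even else -arr[j]) for j < i
--     d = [0]
--     acc = 0
--     s = 1
--     for x in arr:
--         acc += s * x
--         d.append(acc)
--         s = -s
--     T = acc
--     # removing index i balances iff d[i] + d[i+1] == T
--     return sum(1 for a, b in zip(d, d[1:]) if a + b == T)
-- ===== Notes on version B (the rewrite author's own statement) =====
-- stated objective: alternative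
-- what changed: Replaces A's walk that maintains four running accumulators (total_even/total_odd decremented, pre_even/pre_odd incremented) with a signed prefix-sum list d and the closed-form test d[i]+d[i+1]==T on consecutive pairs.
import Mathlib
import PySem

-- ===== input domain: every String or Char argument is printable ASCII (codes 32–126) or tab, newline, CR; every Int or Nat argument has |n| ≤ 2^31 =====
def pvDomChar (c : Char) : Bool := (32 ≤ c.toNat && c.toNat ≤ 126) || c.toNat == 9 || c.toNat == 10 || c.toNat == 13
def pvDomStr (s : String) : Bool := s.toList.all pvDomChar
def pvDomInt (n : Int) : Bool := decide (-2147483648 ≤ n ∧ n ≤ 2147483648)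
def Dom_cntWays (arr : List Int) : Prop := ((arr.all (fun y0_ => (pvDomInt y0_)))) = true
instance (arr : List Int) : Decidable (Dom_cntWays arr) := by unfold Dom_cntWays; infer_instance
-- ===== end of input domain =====

-- B replaces A's decrement-and-maintain walk over four running sums with a signed
-- prefix-sum list d and the closed condition d[i] + d[i+1] == T (objective: alternative).

-- ===== PORT A =====
-- loop state of A's second loop: (i, total_even, total_odd, ans, pre_even, pre_odd)
structure StA where
  i : Nat
  tE : Int
  tO : Int
  ans : Int
  pE : Int
  pO : Int
deriving Repr, DecidableEq

-- one iteration of A's second 'for i in range(n)' loop, x = arr[i]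
def stepA (p : StA) (x : Int) : StA :=
  let tE := if p.i % 2 = 1 then p.tE else p.tE - x
  let tO := if p.i % 2 = 1 then p.tO - x else p.tO
  let newEven := p.pE + tO
  let newOdd := p.pO + tE
  let ans := if newEven = newOdd then p.ans + 1 else p.ans
  let pE := if p.i % 2 = 1 then p.pE else p.pE + x
  let pO := if p.i % 2 = 1 then p.pO + x else p.pO
  ⟨p.i + 1, tE, tO, ans, pE, pO⟩

def cntWays (arr : List Int) : Int :=
  -- first loop: totals (i, total_even, total_odd)
  let t := arr.foldl (fun (p : Nat × Int × Int) x =>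
      if p.1 % 2 = 1 then (p.1 + 1, p.2.1, p.2.2 + x) else (p.1 + 1, p.2.1 + x, p.2.2))
    (0, 0, 0)
  (arr.foldl stepA ⟨0, t.2.1, t.2.2, 0, 0, 0⟩).ans

-- ===== PORT B =====
-- build the signed prefix-sum list: state (d, acc, s)
def stepB (p : List Int × Int × Int) (x : Int) : List Int × Int × Int :=
  (p.1 ++ [p.2.1 + p.2.2 * x], p.2.1 + p.2.2 * x, -p.2.2)

def cntWays_alt (arr : List Int) : Int :=
  let st := arr.foldl stepB ([0], 0, 1)
  let d := st.1
  let T := st.2.1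
  ((d.zip (d.drop 1)).foldl (fun ans ab => if ab.1 + ab.2 = T then ans + 1 else ans) 0)

-- ===== PRECONDITION & SPEC =====
def Spec_cntWays (arr : List Int) (out : Int) : Prop := out = cntWays_alt arr
instance (arr : List Int) (out : Int) : Decidable (Spec_cntWays arr out) := by unfold Spec_cntWays; infer_instance

-- ===== CLAIM (what is proved, stated in full; the proofs are below) =====
def Claim_equal_cntWays : Prop := ∀ (arr : List Int), Dom_cntWays arr → Spec_cntWays arr (cntWays arr)

-- ===== LEMMAS AND PROOFS =====

-- alternating sum of l, first element signed s
def altsum (s : Int) (l : List Int) : Int :=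
  match l with
  | [] => 0
  | x :: xs => s * x + altsum (-s) xs

-- common spec: count positions i where prefix alt-diff p equals the alt-sum of the strict suffix
def cnt (p s : Int) (l : List Int) : Int :=
  match l with
  | [] => 0
  | x :: xs => (if p = altsum (-s) xs then (1:Int) else 0) + cnt (p + s * x) (-s) xs

-- signed prefix sums of l starting from acc with sign s
def diffs (acc s : Int) (l : List Int) : List Int :=
  match l with
  | [] => []
  | x :: xs => (acc + s * x) :: diffs (acc + s * x) (-s) xs

lemma loopA_ans (l : List Int) : ∀ (i : Nat) (tE tO ans pE pO s : Int),
    s = (if i % 2 = 1 then (-1:Int) else 1) →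
    tE - tO = altsum s l →
    (l.foldl stepA ⟨i, tE, tO, ans, pE, pO⟩).ans = ans + cnt (pE - pO) s l := by
  induction l with
  | nil => intro i tE tO ans pE pO s _ _; simp [cnt]
  | cons x xs ih =>
    intro i tE tO ans pE pO s hs hinv
    have hs2 : (-(-1:Int)) = 1 := by norm_num
    by_cases h : i % 2 = 1
    · have h1 : (i + 1) % 2 ≠ 1 := by omega
      simp only [hs, if_pos h, altsum] at hinv
      rw [hs2] at hinv
      simp only [hs, List.foldl_cons, stepA, if_pos h]
      rw [ih (i+1) tE (tO - x) _ pE (pO + x) 1 (by simp [h1]) (by linarith)]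
      have hc : (pE + (tO - x) = pO + tE) ↔ (pE - pO = altsum 1 xs) := by
        constructor <;> intro hh <;> linarith
      simp only [cnt, hs2, hc]
      have hp : pE - (pO + x) = pE - pO + -1 * x := by ring
      rw [hp]
      split_ifs <;> ring
    · have h1 : (i + 1) % 2 = 1 := by omega
      simp only [hs, if_neg h, altsum] at hinv
      simp only [hs, List.foldl_cons, stepA, if_neg h]
      rw [ih (i+1) (tE - x) tO _ (pE + x) pO (-1) (by simp [h1]) (by linarith)]
      have hc : (pE + tO = pO + (tE - x)) ↔ (pE - pO = altsum (-1) xs) := by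
        constructor <;> intro hh <;> linarith
      simp only [cnt, hc]
      have hp : pE + x - pO = pE - pO + 1 * x := by ring
      rw [hp]
      split_ifs <;> ring

lemma loop1_diff (l : List Int) : ∀ (i : Nat) (e o s : Int),
    s = (if i % 2 = 1 then (-1:Int) else 1) →
    (l.foldl (fun (p : Nat × Int × Int) x =>
        if p.1 % 2 = 1 then (p.1 + 1, p.2.1, p.2.2 + x) else (p.1 + 1, p.2.1 + x, p.2.2))
      (i, e, o)).2.1 -
    (l.foldl (fun (p : Nat × Int × Int) x =>
        if p.1 % 2 = 1 then (p.1 + 1, p.2.1, p.2.2 + x) else (p.1 + 1, p.2.1 + x, p.2.2))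
      (i, e, o)).2.2 = e - o + altsum s l := by
  induction l with
  | nil => intro i e o s _; simp [altsum]
  | cons x xs ih =>
    intro i e o s hs
    by_cases h : i % 2 = 1
    · have h1 : (i + 1) % 2 ≠ 1 := by omega
      simp only [List.foldl_cons, if_pos h]
      rw [ih (i+1) e (o + x) 1 (by simp [h1])]
      simp only [hs, if_pos h, altsum]
      have : altsum (-(-1:Int)) xs = altsum 1 xs := by norm_num
      rw [this]; ring
    · have h1 : (i + 1) % 2 = 1 := by omega
      simp only [List.foldl_cons, if_neg h]
      rw [ih (i+1) (e + x) o (-1) (by simp [h1])]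
      simp only [hs, if_neg h, altsum]; ring

lemma buildB_spec (l : List Int) : ∀ (d0 : List Int) (acc s : Int),
    l.foldl stepB (d0, acc, s) =
      (d0 ++ diffs acc s l, acc + altsum s l, if l.length % 2 = 1 then -s else s) := by
  induction l with
  | nil => intro d0 acc s; simp [diffs, altsum]
  | cons x xs ih =>
    intro d0 acc s
    simp only [List.foldl_cons, stepB]
    rw [ih]
    simp only [diffs, altsum, List.length_cons, Prod.mk.injEq]
    refine ⟨by simp, by ring, ?_⟩
    by_cases h : xs.length % 2 = 1
    · have : (xs.length + 1) % 2 ≠ 1 := by omega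
      simp [h, this]
    · have : (xs.length + 1) % 2 = 1 := by omega
      simp [h, this]

lemma zipcount (l : List Int) : ∀ (acc s ans T : Int),
    T = acc + altsum s l →
    (((acc :: diffs acc s l).zip (diffs acc s l)).foldl
        (fun ans ab => if ab.1 + ab.2 = T then ans + 1 else ans) ans) = ans + cnt acc s l := by
  induction l with
  | nil => intro acc s ans T _; simp [diffs, cnt]
  | cons x xs ih =>
    intro acc s ans T hT
    simp only [diffs, altsum] at hT ⊢
    simp only [List.zip_cons_cons, List.foldl_cons]
    have hc : (acc + (acc + s * x) = T) ↔ (acc = altsum (-s) xs) := by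
      constructor <;> intro hh <;> linarith
    rw [ih (acc + s * x) (-s) _ T (by linarith)]
    simp only [cnt, hc]
    split_ifs <;> ring

lemma cntWays_alt_eq (arr : List Int) : cntWays_alt arr = cnt 0 1 arr := by
  unfold cntWays_alt
  rw [buildB_spec]
  simp only [List.singleton_append]
  have hd : (0 :: diffs 0 1 arr).drop 1 = diffs 0 1 arr := rfl
  rw [hd, zipcount arr 0 1 0 (0 + altsum 1 arr) rfl]
  simp

lemma cntWays_eq (arr : List Int) : cntWays arr = cnt 0 1 arr := by
  unfold cntWays
  rw [loopA_ans arr 0 _ _ 0 0 0 1 (by norm_num)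
    (by rw [loop1_diff arr 0 0 0 1 (by norm_num)]; ring)]
  norm_num

-- ===== VERDICT (by name: the statement is the Claim_ definition above) =====
theorem cntWays_spec : Claim_equal_cntWays := by
  intro arr _
  unfold Spec_cntWays
  rw [cntWays_eq, cntWays_alt_eq]
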